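-- pv_equiv track=rewrite | github.com/ShiroKatsuya/Calista-Research-LLMs-Working-Together-with-Moddel-Context-Protocol-MCP | minions/minion copy 2.py | _emphasize_worker_response
-- ===== SOURCE A (Python) =====
-- def _emphasize_worker_response(response: str) -> str:
--     """Add emphasis and prefixes to worker responses to distinguish them."""
--     # Ensure response has supervisor prefix
--     if not response.startswith("@Supervisor:"):
--         emphasized_response = "@Supervisor: " + response
--     else:
--         emphasized_response = response
--
--     # Highlight worker's direct thoughts with bold markers
--     thought_phrases = [
--         "I think", "In my opinion", "my analysis", "From my perspective",
--         "My understanding is", "I believe", "I'd suggest", "I propose",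
--         "my view", "my interpretation", "I'm thinking", "I disagree", "I agree"
--     ]
--
--     for phrase in thought_phrases:
--         if phrase in emphasized_response:
--             emphasized_response = emphasized_response.replace(phrase, f"⚡ {phrase}")
--
--     return emphasized_response
-- ===== SOURCE B (Python) =====
-- _THOUGHT_PHRASES = [
--     "I think", "In my opinion", "my analysis", "From my perspective",
--     "My understanding is", "I believe", "I'd suggest", "I propose",
--     "my view", "my interpretation", "I'm thinking", "I disagree", "I agree"
-- ]
--
--
-- def _emphasize_worker_response(response: str) -> str:
--     """Add emphasis and prefixes to worker responses to distinguish them."""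
--     if not response.startswith("@Supervisor:"):
--         response = "@Supervisor: " + response
--     # Single left-to-right pass: at each position mark the first phrase that
--     # starts there (no two phrases can overlap), instead of one full
--     # replace-scan per phrase.
--     out = []
--     i = 0
--     n = len(response)
--     while i < n:
--         for p in _THOUGHT_PHRASES:
--             if response.startswith(p, i):
--                 out.append("\u26a1 " + p)
--                 i += len(p)
--                 break
--         else:
--             out.append(response[i])
--             i += 1
--     return "".join(out)
-- ===== Notes on version B (the rewrite author's own statement) =====
-- stated objective: alternative
-- what changed: Replaces thirteen sequential full-string replace passes (one per thought phrase) by a single left-to-right scan that, at each position, marks the first phrase starting there and skips past it; correct because no phrase overlaps or contains another.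
import Mathlib
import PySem

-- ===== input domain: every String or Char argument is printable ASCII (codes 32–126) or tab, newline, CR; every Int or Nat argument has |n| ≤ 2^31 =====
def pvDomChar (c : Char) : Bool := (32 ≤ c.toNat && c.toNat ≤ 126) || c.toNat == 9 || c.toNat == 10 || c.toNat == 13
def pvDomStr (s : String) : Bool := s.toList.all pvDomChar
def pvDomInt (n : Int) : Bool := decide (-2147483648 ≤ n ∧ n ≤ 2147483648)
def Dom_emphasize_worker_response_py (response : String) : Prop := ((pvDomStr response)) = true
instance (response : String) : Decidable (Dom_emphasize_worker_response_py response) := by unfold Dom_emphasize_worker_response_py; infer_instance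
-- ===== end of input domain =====

-- B replaces A's thirteen sequential full-string `replace` passes by ONE left-to-right pass
-- that marks, at each position, the first phrase starting there (objective: alternative;
-- no phrase overlaps another, so the marked spans are identical).

-- ===== PORT A =====
def pvPhrases : List String :=
  ["I think", "In my opinion", "my analysis", "From my perspective",
   "My understanding is", "I believe", "I'd suggest", "I propose",
   "my view", "my interpretation", "I'm thinking", "I disagree", "I agree"]

def emphasize_worker_response_py (response : String) : String :=
  let emphasized :=
    if !(PySem.Str.startswith response "@Supervisor:") then "@Supervisor: " ++ response
    else response
  pvPhrases.foldl (fun acc phrase =>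
    if PySem.Str.isIn phrase acc then PySem.Str.replace acc phrase ("⚡ " ++ phrase)
    else acc) emphasized

-- ===== PORT B =====
def pvMark : List Char := ['⚡', ' ']

-- single pass over the characters; at each position the FIRST phrase that starts there is
-- marked and skipped (exact for this phrase list: all phrases are nonempty, so
-- `t.drop (p.length - 1)` is `(c :: t).drop p.length`, the text after the match)
def pvScan (ps : List (List Char)) : List Char → List Char
  | [] => []
  | c :: t =>
    match ps.find? (fun p => p.isPrefixOf (c :: t)) with
    | some p => pvMark ++ p ++ pvScan ps (t.drop (p.length - 1))
    | none => c :: pvScan ps t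
termination_by s => s.length
decreasing_by
  · simp only [List.length_drop, List.length_cons]; omega
  · simp

def emphasize_worker_response_py_alt (response : String) : String :=
  let emphasized :=
    if !(PySem.Str.startswith response "@Supervisor:") then "@Supervisor: " ++ response
    else response
  String.ofList (pvScan (pvPhrases.map String.toList) emphasized.toList)

-- ===== PRECONDITION & SPEC =====
def Spec_emphasize_worker_response_py (response : String) (out : String) : Prop := out = emphasize_worker_response_py_alt response
instance (response : String) (out : String) : Decidable (Spec_emphasize_worker_response_py response out) := by unfold Spec_emphasize_worker_response_py; infer_instance

-- ===== CLAIM (what is proved, stated in full; the proofs are below) =====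
def Claim_equal_emphasize_worker_response_py : Prop := ∀ (response : String), Dom_emphasize_worker_response_py response → Spec_emphasize_worker_response_py response (emphasize_worker_response_py response)

-- ===== LEMMAS AND PROOFS =====

-- no alignment of q against p (q starting j chars into p, j ≠ 0 unless p ≠ q) is consistent
abbrev pvGood (p q : List Char) : Prop :=
  ∀ j, j < p.length → (j ≠ 0 ∨ p ≠ q) → ¬ (q <+: p.drop j ∨ p.drop j <+: q)

lemma pvScan_nil_arg (ps : List (List Char)) : pvScan ps [] = [] := by
  rw [pvScan]

lemma pvScan_cons_none (ps : List (List Char)) (c : Char) (t : List Char)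
    (h : ps.find? (fun p => p.isPrefixOf (c :: t)) = none) :
    pvScan ps (c :: t) = c :: pvScan ps t := by
  rw [pvScan, h]

lemma pvScan_cons_some (ps : List (List Char)) (c : Char) (t : List Char) (p : List Char)
    (h : ps.find? (fun p => p.isPrefixOf (c :: t)) = some p) :
    pvScan ps (c :: t) = pvMark ++ p ++ pvScan ps (t.drop (p.length - 1)) := by
  rw [pvScan, h]

lemma pvScan_nil (s : List Char) : pvScan [] s = s := by
  induction s with
  | nil => exact pvScan_nil_arg _
  | cons c t ih => rw [pvScan_cons_none _ _ _ (by simp)]; rw [ih]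

lemma pvDrop_shift (p : List Char) (c : Char) (t : List Char) (h : p ≠ []) :
    t.drop (p.length - 1) = (c :: t).drop p.length := by
  cases p with
  | nil => exact absurd rfl h
  | cons a l => simp

lemma pvPrefix_append_cases (a x y : List Char) (h : a <+: x ++ y) : a <+: x ∨ x <+: a :=
  List.prefix_or_prefix_of_prefix h (List.prefix_append x y)

lemma pvScan_append (Q : List (List Char)) (x r : List Char)
    (h : ∀ i < x.length, ∀ q ∈ Q, ¬ q <+: (x ++ r).drop i) :
    pvScan Q (x ++ r) = x ++ pvScan Q r := by
  induction x with
  | nil => simp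
  | cons c x' ih =>
    have hn : Q.find? (fun p => p.isPrefixOf (c :: (x' ++ r))) = none := by
      rw [List.find?_eq_none]
      intro q hq
      simp only [List.isPrefixOf_iff_prefix]
      intro hpre
      exact h 0 (by simp) q hq (by simpa using hpre)
    have ih' := ih (fun i hi q hq hpre =>
      h (i + 1) (by simpa using Nat.succ_lt_succ hi) q hq (by simpa using hpre))
    rw [List.cons_append, pvScan_cons_none _ _ _ hn, ih']
    rfl

lemma pvFind_pos (p s : List Char) (h : p <+: s) :
    [p].find? (fun p' => p'.isPrefixOf s) = some p := by
  rw [List.find?_cons, List.isPrefixOf_iff_prefix.mpr h]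

lemma pvFind_neg (p s : List Char) (h : ¬ p <+: s) :
    [p].find? (fun p' => p'.isPrefixOf s) = none := by
  have hb : p.isPrefixOf s = false := by
    cases hcb : p.isPrefixOf s with
    | false => rfl
    | true => exact absurd (List.isPrefixOf_iff_prefix.mp hcb) h
  rw [List.find?_cons, hb]
  rfl

lemma pvScan_single_prefix_iff (p q : List Char) (hstar : '⚡' ∉ q)
    (hgood : pvGood q p) :
    ∀ (s : List Char) (j : Nat), (j ≠ 0 ∨ q ≠ p) →
      (q.drop j <+: pvScan [p] s ↔ q.drop j <+: s) := by
  intro s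
  induction s with
  | nil =>
    intro j _
    rw [pvScan_nil_arg]
  | cons c t ih =>
    intro j hj0
    by_cases hj : q.length ≤ j
    · simp [List.drop_eq_nil_of_le hj]
    · rw [Nat.not_le] at hj
      by_cases hps : p <+: (c :: t)
      · have hs := pvFind_pos p (c :: t) hps
        rw [pvScan_cons_some _ _ _ _ hs]
        constructor
        · intro hl
          exfalso
          rw [List.drop_eq_getElem_cons hj] at hl
          have hmk : pvMark ++ p ++ pvScan [p] (t.drop (p.length - 1))
              = '⚡' :: (' ' :: (p ++ pvScan [p] (t.drop (p.length - 1)))) := rfl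
          rw [hmk, List.cons_prefix_cons] at hl
          exact hstar (hl.1 ▸ List.getElem_mem hj)
        · intro hr
          exfalso
          exact hgood j hj (by tauto) (List.prefix_or_prefix_of_prefix hps hr)
      · have hn := pvFind_neg p (c :: t) hps
        rw [pvScan_cons_none _ _ _ hn, List.drop_eq_getElem_cons hj,
          List.cons_prefix_cons, List.cons_prefix_cons]
        exact and_congr_right fun _ => ih (j + 1) (Or.inl (Nat.succ_ne_zero j))

lemma pvScan_single_of_not_in (p : List Char) (s : List Char)
    (h : ∀ j, ¬ p <+: s.drop j) : pvScan [p] s = s := by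
  induction s with
  | nil => exact pvScan_nil_arg _
  | cons c t ih =>
    have hn : [p].find? (fun p' => p'.isPrefixOf (c :: t)) = none := by
      refine pvFind_neg p (c :: t) ?_
      have := h 0
      simpa using this
    rw [pvScan_cons_none _ _ _ hn, ih]
    intro j hpre
    exact h (j + 1) (by simpa using hpre)

lemma pvGo (p : List Char) (hp : p ≠ []) :
    ∀ (fuel : Nat) (l acc : List Char), l.length ≤ fuel →
      PySem.Chars.replace.go p (pvMark ++ p) fuel l acc = acc.reverse ++ pvScan [p] l := by
  intro fuel
  induction fuel with
  | zero =>
    intro l acc hl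
    have hle : l = [] := List.length_eq_zero_iff.mp (Nat.le_zero.mp hl)
    subst hle
    rw [PySem.Chars.replace.go.eq_1, pvScan_nil_arg]
  | succ n ih =>
    intro l acc hl
    cases l with
    | nil =>
      rw [PySem.Chars.replace.go.eq_2 _ _ _ _ (by omega), pvScan_nil_arg]
      simp
    | cons c t =>
      rw [PySem.Chars.replace.go.eq_3]
      by_cases hps : p <+: (c :: t)
      · have hb : p.isPrefixOf (c :: t) = true := List.isPrefixOf_iff_prefix.mpr hps
        rw [hb]
        simp only [if_true]
        have hplen : 1 ≤ p.length := by
          cases p with | nil => exact absurd rfl hp | cons _ _ => simp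
        have hlen : ((c :: t).drop p.length).length ≤ n := by
          simp only [List.length_drop, List.length_cons]
          simp only [List.length_cons] at hl
          omega
        rw [ih _ _ hlen]
        have hs := pvFind_pos p (c :: t) hps
        rw [pvScan_cons_some _ _ _ _ hs, pvDrop_shift p c t hp]
        simp [List.reverse_append, List.append_assoc]
      · have hb : p.isPrefixOf (c :: t) = false := by
          cases hcb : p.isPrefixOf (c :: t) with
          | false => rfl
          | true => exact absurd (List.isPrefixOf_iff_prefix.mp hcb) hps
        rw [hb]
        simp only [Bool.false_eq_true, if_false]
        have hlen : t.length ≤ n := by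
          simp only [List.length_cons] at hl
          omega
        rw [ih _ _ hlen]
        have hn := pvFind_neg p (c :: t) hps
        rw [pvScan_cons_none _ _ _ hn]
        simp only [List.reverse_cons, List.append_assoc, List.cons_append, List.nil_append]

lemma pvReplace_eq (p s : List Char) (hp : p ≠ []) :
    PySem.Chars.replace s p (pvMark ++ p) = pvScan [p] s := by
  rw [PySem.Chars.replace]
  have he : p.isEmpty = false := by cases p with | nil => exact absurd rfl hp | cons _ _ => rfl
  rw [he]
  simpa using pvGo p hp s.length s [] (le_refl _)

lemma pvStep_eq (p s : List Char) (hp : p ≠ []) :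
    (if PySem.Chars.isIn p s then PySem.Chars.replace s p (pvMark ++ p) else s) = pvScan [p] s := by
  by_cases h : PySem.Chars.isIn p s = true
  · rw [if_pos h, pvReplace_eq p s hp]
  · rw [if_neg (by simpa using h)]
    refine (pvScan_single_of_not_in p s ?_).symm
    intro j hpre
    exact h ((PySem.Chars.exists_prefix_drop_iff_isIn p s).mp ⟨j, hpre⟩)

lemma pvFind_congr (Q : List (List Char)) (s s' : List Char)
    (h : ∀ q ∈ Q, (q.isPrefixOf s) = (q.isPrefixOf s')) :
    Q.find? (fun q => q.isPrefixOf s) = Q.find? (fun q => q.isPrefixOf s') := by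
  induction Q with
  | nil => rfl
  | cons q Q ih =>
    rw [List.find?_cons, List.find?_cons, h q (List.mem_cons_self), ih]
    intro q' hq'
    exact h q' (List.mem_cons_of_mem _ hq')

lemma pvCompose (p : List Char) (Q : List (List Char))
    (hpne : p ≠ []) (hpQ : p ∉ Q)
    (hq : ∀ q ∈ Q, q ≠ [] ∧ '⚡' ∉ q ∧ q.head? ≠ some ' ')
    (hgpq : ∀ q ∈ Q, pvGood p q) (hgqp : ∀ q ∈ Q, pvGood q p) :
    ∀ (n : Nat) (s : List Char), s.length ≤ n →
      pvScan Q (pvScan [p] s) = pvScan (p :: Q) s := by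
  intro n
  induction n with
  | zero =>
    intro s hs
    have : s = [] := List.length_eq_zero_iff.mp (Nat.le_zero.mp hs)
    subst this
    rw [pvScan_nil_arg, pvScan_nil_arg, pvScan_nil_arg]
  | succ n ih =>
    intro s hs
    cases s with
    | nil => rw [pvScan_nil_arg, pvScan_nil_arg, pvScan_nil_arg]
    | cons c t =>
      have hplen : 1 ≤ p.length := by
        cases p with | nil => exact absurd rfl hpne | cons _ _ => simp
      by_cases hps : p <+: (c :: t)
      · -- p matches at the head: both sides emit the mark and p, then continue after it
        rw [pvScan_cons_some _ _ _ _ (pvFind_pos p (c :: t) hps), pvDrop_shift p c t hpne]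
        have hskip : ∀ i < (pvMark ++ p).length, ∀ q ∈ Q,
            ¬ q <+: ((pvMark ++ p) ++ pvScan [p] ((c :: t).drop p.length)).drop i := by
          intro i hi q hqm hpre
          obtain ⟨hqne, hqstar, hqhead⟩ := hq q hqm
          match i, hi with
          | 0, _ =>
            rcases List.prefix_cons_iff.mp hpre with h1 | ⟨t', h1, _⟩
            · exact hqne h1
            · exact hqstar (by rw [h1]; exact List.mem_cons_self)
          | 1, _ =>
            rcases List.prefix_cons_iff.mp (by simpa using hpre) with h1 | ⟨t', h1, _⟩
            · exact hqne h1
            · exact hqhead (by rw [h1]; rfl)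
          | (j + 2), hi =>
            have hj : j < p.length := by
              simpa [pvMark] using hi
            have hdrop : ((pvMark ++ p) ++ pvScan [p] ((c :: t).drop p.length)).drop (j + 2)
                = p.drop j ++ pvScan [p] ((c :: t).drop p.length) := by
              show (('⚡' :: ' ' :: p) ++ pvScan [p] ((c :: t).drop p.length)).drop (j + 2) = _
              simp [List.drop_append_of_le_length, Nat.le_of_lt hj]
            rw [hdrop] at hpre
            have hpq0 : j ≠ 0 ∨ p ≠ q := by
              by_cases hj0 : j = 0
              · exact Or.inr (fun he => hpQ (he ▸ hqm))
              · exact Or.inl hj0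
            exact hgpq q hqm j hj hpq0 (pvPrefix_append_cases q (p.drop j) _ hpre)
        rw [pvScan_append Q (pvMark ++ p) _ hskip]
        have hlen : ((c :: t).drop p.length).length ≤ n := by
          simp only [List.length_drop, List.length_cons]
          simp only [List.length_cons] at hs
          omega
        rw [ih _ hlen]
        rw [pvScan_cons_some (p :: Q) c t p (by
          rw [List.find?_cons, List.isPrefixOf_iff_prefix.mpr hps]),
          pvDrop_shift p c t hpne]
      · -- p does not match at the head
        rw [pvScan_cons_none _ _ _ (pvFind_neg p (c :: t) hps)]
        have hcongr : ∀ q ∈ Q, (q.isPrefixOf (c :: pvScan [p] t)) = (q.isPrefixOf (c :: t)) := by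
          intro q hqm
          obtain ⟨hqne, hqstar, _⟩ := hq q hqm
          cases q with
          | nil => rfl
          | cons a q' =>
            have hiff : (a :: q' <+: c :: pvScan [p] t) ↔ (a :: q' <+: c :: t) := by
              rw [List.cons_prefix_cons, List.cons_prefix_cons]
              refine and_congr_right fun _ => ?_
              have := pvScan_single_prefix_iff p (a :: q') hqstar (hgqp _ hqm) t 1
                (Or.inl one_ne_zero)
              simpa using this
            cases hb : (a :: q').isPrefixOf (c :: t) with
            | true =>
              exact List.isPrefixOf_iff_prefix.mpr
                (hiff.mpr (List.isPrefixOf_iff_prefix.mp hb))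
            | false =>
              cases hb' : (a :: q').isPrefixOf (c :: pvScan [p] t) with
              | false => rfl
              | true =>
                exact absurd (List.isPrefixOf_iff_prefix.mpr
                  (hiff.mp (List.isPrefixOf_iff_prefix.mp hb'))) (by simp [hb])
        have hfind := pvFind_congr Q (c :: pvScan [p] t) (c :: t) hcongr
        cases hf : Q.find? (fun q => q.isPrefixOf (c :: t)) with
        | none =>
          rw [pvScan_cons_none Q c (pvScan [p] t) (hfind.trans hf)]
          have hlen : t.length ≤ n := by
            simp only [List.length_cons] at hs
            omega
          rw [ih t hlen]
          rw [pvScan_cons_none (p :: Q) c t (by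
            rw [List.find?_cons]
            have hb : p.isPrefixOf (c :: t) = false := by
              cases hcb : p.isPrefixOf (c :: t) with
              | false => rfl
              | true => exact absurd (List.isPrefixOf_iff_prefix.mp hcb) hps
            rw [hb]
            exact hf)]
        | some q0 =>
          have hq0mem : q0 ∈ Q := List.mem_of_find?_eq_some hf
          have hq0b := List.find?_some hf
          have hq0pref : q0 <+: c :: t := List.isPrefixOf_iff_prefix.mp (by simpa using hq0b)
          obtain ⟨hq0ne, hq0star, _⟩ := hq q0 hq0mem
          have hq0len : 1 ≤ q0.length := by
            cases q0 with | nil => exact absurd rfl hq0ne | cons _ _ => simp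
          rw [pvScan_cons_some Q c (pvScan [p] t) q0 (hfind.trans hf)]
          -- the scanned tail agrees with the original tail through the span of q0
          have hnomatch : ∀ i < q0.length - 1, ¬ p <+: t.drop i := by
            intro i hi hpre
            have h1 : q0.drop (i + 1) <+: t.drop i := by
              have := hq0pref.drop (i + 1)
              simpa using this
            have h2 : i + 1 < q0.length := by omega
            have hne : q0.drop (i + 1) ≠ [] := by
              intro he
              have := List.drop_eq_nil_iff.mp he
              omega
            exact hgqp q0 hq0mem (i + 1) h2 (Or.inl (Nat.succ_ne_zero i))
              (List.prefix_or_prefix_of_prefix hpre h1)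
          have htlen : q0.length - 1 ≤ t.length := by
            have := hq0pref.length_le
            simp only [List.length_cons] at this
            omega
          have hsplit : pvScan [p] t
              = t.take (q0.length - 1) ++ pvScan [p] (t.drop (q0.length - 1)) := by
            have := pvScan_append [p] (t.take (q0.length - 1)) (t.drop (q0.length - 1)) (by
              intro i hi q hqm hpre
              rw [List.mem_singleton] at hqm
              subst hqm
              rw [List.take_append_drop] at hpre
              have hi' : i < q0.length - 1 := by
                have := List.length_take_le (q0.length - 1) t
                have h2 : (t.take (q0.length - 1)).length = min (q0.length - 1) t.length :=
                  List.length_take ..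
                omega
              exact hnomatch i hi' hpre)
            rw [List.take_append_drop] at this
            exact this
          have hdrop : (pvScan [p] t).drop (q0.length - 1)
              = pvScan [p] (t.drop (q0.length - 1)) := by
            rw [hsplit, List.drop_left' (by
              rw [List.length_take]
              omega)]
          rw [hdrop]
          have hlen : (t.drop (q0.length - 1)).length ≤ n := by
            simp only [List.length_drop, List.length_cons] at *
            omega
          rw [ih _ hlen]
          rw [pvScan_cons_some (p :: Q) c t q0 (by
            rw [List.find?_cons]
            have hb : p.isPrefixOf (c :: t) = false := by
              cases hcb : p.isPrefixOf (c :: t) with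
              | false => rfl
              | true => exact absurd (List.isPrefixOf_iff_prefix.mp hcb) hps
            rw [hb]
            exact hf)]

lemma pvFold_chars (L : List (List Char))
    (hnd : L.Nodup)
    (hq : ∀ q ∈ L, q ≠ [] ∧ '⚡' ∉ q ∧ q.head? ≠ some ' ')
    (hg : ∀ p ∈ L, ∀ q ∈ L, pvGood p q) :
    ∀ s : List Char,
      L.foldl (fun acc p =>
        if PySem.Chars.isIn p acc then PySem.Chars.replace acc p (pvMark ++ p) else acc) s
      = pvScan L s := by
  induction L with
  | nil => intro s; rw [pvScan_nil]; rfl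
  | cons p Q ih =>
    intro s
    have hpne : p ≠ [] := (hq p List.mem_cons_self).1
    rw [List.foldl_cons, pvStep_eq p s hpne]
    rw [ih (List.Nodup.of_cons hnd)
      (fun q hqm => hq q (List.mem_cons_of_mem _ hqm))
      (fun a ha b hb => hg a (List.mem_cons_of_mem _ ha) b (List.mem_cons_of_mem _ hb))]
    exact pvCompose p Q hpne ((List.nodup_cons.mp hnd).1)
      (fun q hqm => hq q (List.mem_cons_of_mem _ hqm))
      (fun q hqm => hg p List.mem_cons_self q (List.mem_cons_of_mem _ hqm))
      (fun q hqm => hg q (List.mem_cons_of_mem _ hqm) p List.mem_cons_self)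
      s.length s (le_refl _)

lemma pvFold_toList (L : List String) :
    ∀ s : String,
      (L.foldl (fun acc phrase =>
        if PySem.Str.isIn phrase acc then PySem.Str.replace acc phrase ("⚡ " ++ phrase)
        else acc) s).toList
      = (L.map String.toList).foldl (fun acc p =>
          if PySem.Chars.isIn p acc then PySem.Chars.replace acc p (pvMark ++ p) else acc)
          s.toList := by
  induction L with
  | nil => intro s; rfl
  | cons phrase L ih =>
    intro s
    rw [List.foldl_cons, List.map_cons, List.foldl_cons, ih]
    congr 1
    by_cases h : PySem.Str.isIn phrase s = true
    · have hc : PySem.Chars.isIn phrase.toList s.toList = true := h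
      rw [if_pos h, if_pos hc]
      show (String.ofList (PySem.Chars.replace s.toList phrase.toList
        ("⚡ " ++ phrase).toList)).toList = _
      rw [String.toList_ofList]
      congr 1
      rw [String.toList_append]
      rfl
    · have hc : ¬ PySem.Chars.isIn phrase.toList s.toList = true := h
      rw [if_neg h, if_neg hc]

-- ===== VERDICT (by name: the statement is the Claim_ definition above) =====
theorem emphasize_worker_response_py_spec : Claim_equal_emphasize_worker_response_py := by
  intro response _
  unfold Spec_emphasize_worker_response_py
  unfold emphasize_worker_response_py emphasize_worker_response_py_alt
  set E : String :=
    if !(PySem.Str.startswith response "@Supervisor:") then "@Supervisor: " ++ response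
    else response with hE
  have hhyp1 : (pvPhrases.map String.toList).Nodup := by decide
  have hhyp2 : ∀ q ∈ pvPhrases.map String.toList,
      q ≠ [] ∧ '⚡' ∉ q ∧ q.head? ≠ some ' ' := by decide
  have hhyp3 : ∀ p ∈ pvPhrases.map String.toList, ∀ q ∈ pvPhrases.map String.toList,
      pvGood p q := by decide
  calc pvPhrases.foldl (fun acc phrase =>
        if PySem.Str.isIn phrase acc then PySem.Str.replace acc phrase ("⚡ " ++ phrase)
        else acc) E
      = String.ofList ((pvPhrases.foldl (fun acc phrase =>
          if PySem.Str.isIn phrase acc then PySem.Str.replace acc phrase ("⚡ " ++ phrase)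
          else acc) E).toList) := by rw [String.ofList_toList]
    _ = String.ofList (pvScan (pvPhrases.map String.toList) E.toList) := by
        rw [pvFold_toList, pvFold_chars _ hhyp1 hhyp2 hhyp3]
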